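-- pv_equiv track=rewrite | github.com/zoltanpal/power_of_words | app/blueprints/analytics.py | generate_sentiment_by_source_series
-- ===== SOURCE A (Python) =====
-- def generate_sentiment_by_source_series(input_data):
--     negative_data = {}
--     neutral_data = {}
--     positive_data = {}
--
--     for item in input_data:
--         key = item[0]  # position
--         value = item[1]  # data
--         sentiment = item[2]
--
--         if sentiment == "negative":
--             if key not in negative_data:
--                 negative_data[key] = []
--             negative_data[key].append(value)
--         elif sentiment == "neutral":
--             if key not in neutral_data:
--                 neutral_data[key] = []
--             neutral_data[key].append(value)
--         elif sentiment == "positive":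
--             if key not in positive_data:
--                 positive_data[key] = []
--             positive_data[key].append(value)
--
--     series_data = {"Negative": [], "Neutral": [], "Positive": []}
--     for key in sorted(
--         set(negative_data.keys()) | set(neutral_data.keys()) | set(positive_data.keys())
--     ):
--         series_data["Negative"].extend(negative_data.get(key, [0]))
--         series_data["Neutral"].extend(neutral_data.get(key, [0]))
--         series_data["Positive"].extend(positive_data.get(key, [0]))
--
--     return series_data
-- ===== SOURCE B (Python) =====
-- def generate_sentiment_by_source_series(input_data):
--     sentiments = ("negative", "neutral", "positive")
--     keys = sorted({item[0] for item in input_data if item[2] in sentiments})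
--
--     def series(sentiment):
--         out = []
--         for k in keys:
--             vs = [item[1] for item in input_data if item[0] == k and item[2] == sentiment]
--             out.extend(vs if vs else [0])
--         return out
--
--     return {
--         "Negative": series("negative"),
--         "Neutral": series("neutral"),
--         "Positive": series("positive"),
--     }
-- ===== Notes on version B (the rewrite author's own statement) =====
-- stated objective: alternative
-- what changed: Replaces the three hash-dicts plus sorted set-union with a dict-free formulation: compute the sorted distinct keys of relevantly-tagged items once, then build each sentiment series directly by filtering the input per key, trading A's O(n) grouping for O(n*k) scans in exchange for a shorter, declarative decomposition.
import Mathlib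
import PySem

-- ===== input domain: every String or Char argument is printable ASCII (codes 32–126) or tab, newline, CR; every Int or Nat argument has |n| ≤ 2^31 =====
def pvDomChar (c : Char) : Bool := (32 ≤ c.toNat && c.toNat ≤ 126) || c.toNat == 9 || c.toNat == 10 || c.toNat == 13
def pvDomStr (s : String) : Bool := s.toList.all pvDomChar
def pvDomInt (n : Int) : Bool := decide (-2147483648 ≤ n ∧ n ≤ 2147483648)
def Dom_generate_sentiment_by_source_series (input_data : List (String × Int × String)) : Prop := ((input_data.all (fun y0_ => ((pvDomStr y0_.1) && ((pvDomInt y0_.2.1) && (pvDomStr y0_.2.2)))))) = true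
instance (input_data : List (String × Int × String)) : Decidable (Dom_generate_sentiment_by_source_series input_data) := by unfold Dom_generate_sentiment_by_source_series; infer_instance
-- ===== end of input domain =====

-- B replaces A's three hash-dicts + sorted set-union with a dict-free decomposition (sorted
-- distinct keys once, then per-key filters of the input); alternative structure, not faster.

-- ===== PORT A =====
-- Python's `if key not in d: d[key] = []` followed by `d[key].append(value)` is exactly
-- `d.modify key [] (· ++ [value])` (d[key] = d.get(key, []) + [value], same insertion position).
def generate_sentiment_by_source_series (input_data : List (String × Int × String)) : List (String × List Int) :=
  let dicts := input_data.foldl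
    (fun (dicts : PySem.Dict String (List Int) × PySem.Dict String (List Int) × PySem.Dict String (List Int)) item =>
      let key := item.1
      let value := item.2.1
      let sentiment := item.2.2
      if sentiment == "negative" then
        (dicts.1.modify key [] (· ++ [value]), dicts.2.1, dicts.2.2)
      else if sentiment == "neutral" then
        (dicts.1, dicts.2.1.modify key [] (· ++ [value]), dicts.2.2)
      else if sentiment == "positive" then
        (dicts.1, dicts.2.1, dicts.2.2.modify key [] (· ++ [value]))
      else dicts)
    (PySem.Dict.empty, PySem.Dict.empty, PySem.Dict.empty)
  let negative_data := dicts.1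
  let neutral_data := dicts.2.1
  let positive_data := dicts.2.2
  let series_data : PySem.Dict String (List Int) :=
    ((PySem.Dict.empty.insert "Negative" []).insert "Neutral" []).insert "Positive" []
  let keys := PySem.List.sorted
    (PySem.Set.union (PySem.Set.union (PySem.Set.ofList negative_data.keys) neutral_data.keys) positive_data.keys)
    (fun k => k) false
  let series_data := keys.foldl
    (fun (sd : PySem.Dict String (List Int)) key =>
      let sd := sd.modify "Negative" [] (· ++ negative_data.getD key [0])
      let sd := sd.modify "Neutral" [] (· ++ neutral_data.getD key [0])
      sd.modify "Positive" [] (· ++ positive_data.getD key [0]))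
    series_data
  series_data.items

-- ===== PORT B =====
def pvB_keys (input_data : List (String × Int × String)) : List String :=
  PySem.List.sorted
    (PySem.Set.ofList
      ((input_data.filter (fun item =>
        item.2.2 == "negative" || item.2.2 == "neutral" || item.2.2 == "positive")).map (·.1)))
    (fun k => k) false

def pvB_series (input_data : List (String × Int × String)) (keys : List String) (sentiment : String) : List Int :=
  keys.foldl
    (fun out k =>
      let vs := (input_data.filter (fun item => item.1 == k && item.2.2 == sentiment)).map (·.2.1)
      out ++ (if vs.isEmpty then [0] else vs))
    []

def generate_sentiment_by_source_series_alt (input_data : List (String × Int × String)) : List (String × List Int) :=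
  let keys := pvB_keys input_data
  [("Negative", pvB_series input_data keys "negative"),
   ("Neutral", pvB_series input_data keys "neutral"),
   ("Positive", pvB_series input_data keys "positive")]

-- ===== PRECONDITION & SPEC =====
def Spec_generate_sentiment_by_source_series (input_data : List (String × Int × String)) (out : List (String × List Int)) : Prop := out = generate_sentiment_by_source_series_alt input_data
instance (input_data : List (String × Int × String)) (out : List (String × List Int)) : Decidable (Spec_generate_sentiment_by_source_series input_data out) := by unfold Spec_generate_sentiment_by_source_series; infer_instance

-- ===== CLAIM (what is proved, stated in full; the proofs are below) =====
def Claim_equal_generate_sentiment_by_source_series : Prop := ∀ (input_data : List (String × Int × String)), Dom_generate_sentiment_by_source_series input_data → Spec_generate_sentiment_by_source_series input_data (generate_sentiment_by_source_series input_data)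

-- ===== LEMMAS AND PROOFS =====

-- values of items with key k and sentiment s, in input order
def pvVals (input_data : List (String × Int × String)) (k s : String) : List Int :=
  (input_data.filter (fun it => it.1 == k && it.2.2 == s)).map (·.2.1)

-- the grouping dict A builds for one sentiment, as a single uniform fold
def pvGrp (input_data : List (String × Int × String)) (s : String) : PySem.Dict String (List Int) :=
  input_data.foldl
    (fun d it => if it.2.2 == s then d.modify it.1 [] (· ++ [it.2.1]) else d)
    PySem.Dict.empty

-- A's triple-dict fold splits into three independent single-sentiment folds
theorem pv_fold_split (input_data : List (String × Int × String))
    (n u p : PySem.Dict String (List Int)) :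
    input_data.foldl
      (fun (dicts : PySem.Dict String (List Int) × PySem.Dict String (List Int) × PySem.Dict String (List Int)) item =>
        if item.2.2 == "negative" then
          (dicts.1.modify item.1 [] (· ++ [item.2.1]), dicts.2.1, dicts.2.2)
        else if item.2.2 == "neutral" then
          (dicts.1, dicts.2.1.modify item.1 [] (· ++ [item.2.1]), dicts.2.2)
        else if item.2.2 == "positive" then
          (dicts.1, dicts.2.1, dicts.2.2.modify item.1 [] (· ++ [item.2.1]))
        else dicts)
      (n, u, p)
    = (input_data.foldl (fun d it => if it.2.2 == "negative" then d.modify it.1 [] (· ++ [it.2.1]) else d) n,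
       input_data.foldl (fun d it => if it.2.2 == "neutral" then d.modify it.1 [] (· ++ [it.2.1]) else d) u,
       input_data.foldl (fun d it => if it.2.2 == "positive" then d.modify it.1 [] (· ++ [it.2.1]) else d) p) := by
  induction input_data generalizing n u p with
  | nil => rfl
  | cons it rest ih =>
    simp only [List.foldl_cons]
    by_cases h1 : it.2.2 == "negative" <;> by_cases h2 : it.2.2 == "neutral" <;>
      by_cases h3 : it.2.2 == "positive" <;> simp_all

-- pvGrp as a fold of pair-modifies over the filtered, pairized list
theorem pvGrp_eq_pairs (input_data : List (String × Int × String)) (s : String) :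
    pvGrp input_data s
    = ((input_data.filter (fun it => it.2.2 == s)).map (fun it => (it.1, it.2.1))).foldl
        (fun d pr => d.modify pr.1 [] (· ++ [pr.2])) PySem.Dict.empty := by
  rw [pvGrp, List.foldl_map, List.foldl_filter]

theorem pvGrp_getD_nil (input_data : List (String × Int × String)) (s k : String) :
    (pvGrp input_data s).getD k [] = pvVals input_data k s := by
  rw [pvGrp_eq_pairs, PySem.Dict.getD_foldl_modify_append]
  simp [PySem.Dict.getD_empty, List.filter_map, Function.comp_def, pvVals, List.filter_filter]

theorem pvGrp_keys (input_data : List (String × Int × String)) (s : String) :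
    (pvGrp input_data s).keys
    = PySem.Set.ofList ((input_data.filter (fun it => it.2.2 == s)).map (·.1)) := by
  rw [pvGrp_eq_pairs, PySem.Dict.keys_foldl_modify_key]
  simp [PySem.Dict.keys_empty, PySem.Set.update, PySem.Set.ofList, List.map_map, Function.comp_def]

theorem pvGrp_mem_keys (input_data : List (String × Int × String)) (s k : String) :
    k ∈ (pvGrp input_data s).keys ↔ pvVals input_data k s ≠ [] := by
  rw [pvGrp_keys]
  simp [PySem.Set.mem_ofList, pvVals, List.mem_filter, List.filter_eq_nil_iff]

-- the per-key chunk A emits (.get(key, [0])) equals B's "filtered values or [0]"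
theorem pvGrp_getD_zero (input_data : List (String × Int × String)) (s k : String) :
    (pvGrp input_data s).getD k [0]
    = if (pvVals input_data k s).isEmpty then [0] else pvVals input_data k s := by
  by_cases hv : pvVals input_data k s = []
  · have hnk : k ∉ (pvGrp input_data s).keys := by simp [pvGrp_mem_keys, hv]
    rw [PySem.Dict.getD_of_not_contains _ _ (by
      simpa using (not_iff_not.mpr (PySem.Dict.contains_iff_mem_keys _ _)).mpr hnk)]
    simp [hv]
  · have hk : k ∈ (pvGrp input_data s).keys := (pvGrp_mem_keys _ _ _).2 hv
    have hne : (pvGrp input_data s).get? k ≠ none := fun h =>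
      ((PySem.Dict.get?_eq_none_iff_not_mem_keys _ _).mp h) hk
    obtain ⟨v, hv'⟩ := Option.ne_none_iff_exists'.mp hne
    have e1 := PySem.Dict.getD_of_get?_eq_some _ ([] : List Int) hv'
    have e2 := PySem.Dict.getD_of_get?_eq_some _ ([0] : List Int) hv'
    rw [pvGrp_getD_nil] at e1
    simp [e2, ← e1, hv]

-- A's sorted key union equals B's sorted distinct key list
theorem pv_keys_eq (input_data : List (String × Int × String)) :
    PySem.List.sorted
      (PySem.Set.union
        (PySem.Set.union (PySem.Set.ofList (pvGrp input_data "negative").keys)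
          (pvGrp input_data "neutral").keys)
        (pvGrp input_data "positive").keys)
      (fun k => k) false
    = pvB_keys input_data := by
  rw [pvB_keys]
  apply PySem.List.sorted_eq_sorted_of_perm _ _ _ (fun a b h => h)
  apply (List.perm_ext_iff_of_nodup ?_ ?_).mpr
  · intro a
    simp [PySem.Set.mem_union, PySem.Set.mem_ofList, pvGrp_keys, List.mem_filter]
    constructor
    · rintro ((⟨v,h⟩|⟨v,h⟩)|⟨v,h⟩) <;> exact ⟨v, _, h, by simp⟩
    · rintro ⟨v, b, h, (rfl|rfl)|rfl⟩
      · exact Or.inl (Or.inl ⟨v, h⟩)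
      · exact Or.inl (Or.inr ⟨v, h⟩)
      · exact Or.inr ⟨v, h⟩
  · refine PySem.Set.nodup_union _ _ (PySem.Set.nodup_union _ _ ?_)
    exact PySem.Set.nodup_ofList _
  · exact PySem.Set.nodup_ofList _

-- the three-key series dict, abstracted over its values
def pvSd3 (a b c : List Int) : PySem.Dict String (List Int) :=
  ((PySem.Dict.empty.insert "Negative" a).insert "Neutral" b).insert "Positive" c

theorem pvSd3_step (a b c x y z : List Int) :
    (((pvSd3 a b c).modify "Negative" [] (· ++ x)).modify "Neutral" [] (· ++ y)).modify "Positive" [] (· ++ z)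
    = pvSd3 (a ++ x) (b ++ y) (c ++ z) := by
  rfl

theorem pvSd3_fold (keys : List String) (fN fU fP : String → List Int) (a b c : List Int) :
    keys.foldl
      (fun (sd : PySem.Dict String (List Int)) key =>
        ((sd.modify "Negative" [] (· ++ fN key)).modify "Neutral" [] (· ++ fU key)).modify "Positive" [] (· ++ fP key))
      (pvSd3 a b c)
    = pvSd3 (a ++ keys.flatMap fN) (b ++ keys.flatMap fU) (c ++ keys.flatMap fP) := by
  induction keys generalizing a b c with
  | nil => simp
  | cons k rest ih => simp [List.foldl_cons, pvSd3_step, ih]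

theorem pvSd3_items (a b c : List Int) :
    (pvSd3 a b c).items = [("Negative", a), ("Neutral", b), ("Positive", c)] := by
  rfl

theorem pvB_series_eq_flatMap (input_data : List (String × Int × String)) (keys : List String) (s : String) :
    pvB_series input_data keys s
    = keys.flatMap (fun k =>
        if (pvVals input_data k s).isEmpty then [0] else pvVals input_data k s) := by
  rw [pvB_series]
  simpa [pvVals] using PySem.List.foldl_append_eq_flatMap
    (fun k => if (pvVals input_data k s).isEmpty then [0] else pvVals input_data k s) keys []

-- ===== VERDICT (by name: the statement is the Claim_ definition above) =====
theorem generate_sentiment_by_source_series_spec : Claim_equal_generate_sentiment_by_source_series := by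
  intro input_data _
  unfold Spec_generate_sentiment_by_source_series
  simp only [generate_sentiment_by_source_series, generate_sentiment_by_source_series_alt]
  rw [pv_fold_split]
  show (_ : List (String × List Int)) = _
  rw [show (((PySem.Dict.empty.insert "Negative" ([] : List Int)).insert "Neutral" []).insert "Positive" [])
        = pvSd3 [] [] [] from rfl]
  rw [show (input_data.foldl (fun d it => if it.2.2 == "negative" then d.modify it.1 [] (· ++ [it.2.1]) else d)
        PySem.Dict.empty) = pvGrp input_data "negative" from rfl,
      show (input_data.foldl (fun d it => if it.2.2 == "neutral" then d.modify it.1 [] (· ++ [it.2.1]) else d)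
        PySem.Dict.empty) = pvGrp input_data "neutral" from rfl,
      show (input_data.foldl (fun d it => if it.2.2 == "positive" then d.modify it.1 [] (· ++ [it.2.1]) else d)
        PySem.Dict.empty) = pvGrp input_data "positive" from rfl]
  rw [pv_keys_eq, pvSd3_fold, pvSd3_items]
  simp only [List.nil_append, pvGrp_getD_zero, pvB_series_eq_flatMap]
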